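-- pv_equiv track=rewrite | github.com/dev-akshat/HackerRank_Solutions | Interview Preparation Kit/String Manipulation/special_string_again.py | substrCount3
-- ===== SOURCE A (Python) =====
-- from itertools import combinations, groupby
-- from collections import Counter
--
-- def substrCount3(n, s):
--     count = 0
--     for x in (s[x:y]
--               for x, y in combinations(range(n + 1), r=2)
--               ):
--         if x == x[::-1] and len(Counter(x)) <= 2:
--             count += 1
--     return count
-- ===== SOURCE B (Python) =====
-- def substrCount3(n, s):
--     # Bottom-up palindrome DP with an incremental set of distinct characters:
--     # for each start x (from the right), extend the end y and reuse the
--     # palindrome flags of the row for x+1.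
--     k = min(n, len(s))
--     t = s[:k]
--     count = 0
--     nxt = [True] * (k + 1)          # nxt[y]: t[x+1:y] is a palindrome
--     for x in range(k - 1, -1, -1):
--         cur = [True] * (x + 1)      # t[x:y] is trivially a palindrome for y <= x
--         seen = set()
--         for y in range(x + 1, k + 1):
--             seen.add(t[y - 1])
--             p = t[x] == t[y - 1] and nxt[y - 1]
--             cur.append(p)
--             if p and len(seen) <= 2:
--                 count += 1
--         nxt = cur
--     return count
-- ===== Notes on version B (the rewrite author's own statement) =====
-- stated objective: faster
-- what changed: Replaced the brute-force scan over all index pairs (slice, reverse, Counter per substring) by an O(n^2) palindrome DP with an incremental distinct-character set per start index; Pre_ excludes n > len(s), outside the function's contract, where A's out-of-range slice indices make it count clamped duplicate and empty slices.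
-- outside the precondition, e.g. on substrCount3(2, 'a'): A returns 3, B returns 1; on substrCount3(3, ''): A returns 6, B returns 0
import Mathlib
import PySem

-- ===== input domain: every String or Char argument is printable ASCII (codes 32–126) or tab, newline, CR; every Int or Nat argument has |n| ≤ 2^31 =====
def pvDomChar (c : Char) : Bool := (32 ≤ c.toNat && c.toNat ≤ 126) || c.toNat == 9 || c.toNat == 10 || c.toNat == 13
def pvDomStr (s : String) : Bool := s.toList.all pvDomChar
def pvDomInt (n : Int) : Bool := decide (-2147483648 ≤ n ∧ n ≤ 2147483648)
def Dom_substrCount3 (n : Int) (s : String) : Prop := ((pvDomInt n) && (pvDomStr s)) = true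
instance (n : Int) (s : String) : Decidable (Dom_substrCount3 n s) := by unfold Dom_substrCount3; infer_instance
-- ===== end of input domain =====

-- B replaces A's brute-force scan over all index pairs (slice + reverse + Counter per
-- substring) by a palindrome DP with an incremental distinct-char set (measured faster);
-- Pre_ below restricts to the function's contract n <= len(s).

-- ===== PORT A =====
-- the body of A's loop over combinations(range(n+1), r=2)
def pvABody (s : String) (count : Int) (c : List Int) : Int :=
  let x := c.getD 0 0
  let y := c.getD 1 0
  let sub := PySem.Str.slice s (some x) (some y)
  let rev := (PySem.Str.slice? sub none none (-1)).getD ""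
  if sub == rev && decide ((PySem.Dict.counter sub.toList).size ≤ 2) then count + 1 else count

def substrCount3 (n : Int) (s : String) : Int :=
  (PySem.List.combinations (PySem.List.pyRange 0 (n + 1) 1) 2).foldl (pvABody s) 0

-- ===== PORT B =====
-- inner loop body of Source B (the y-loop); `nxt` is the palindrome row for x+1
def pvBInner (tl : List Char) (x : Int) (nxt : List Bool)
    (st : List Bool × PySem.Set Char × Int) (y : Int) :
    List Bool × PySem.Set Char × Int :=
  let c := PySem.List.pyGetD tl (y - 1) ' '
  let seen := PySem.Set.add st.2.1 c
  let p := (PySem.List.pyGetD tl x ' ' == c) && PySem.List.pyGetD nxt (y - 1) true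
  let cur := st.1 ++ [p]
  if p && decide (PySem.Set.len seen ≤ 2) then
    (cur, seen, st.2.2 + 1)
  else
    (cur, seen, st.2.2)

-- outer loop body of Source B (the x-loop); state = (nxt, count)
def pvBOuter (tl : List Char) (k : Int) (st : List Bool × Int) (x : Int) :
    List Bool × Int :=
  let r := (PySem.List.pyRange (x + 1) (k + 1) 1).foldl (pvBInner tl x st.1)
      (List.replicate (x + 1).toNat true, PySem.Set.empty, st.2)
  (r.1, r.2.2)

def substrCount3_alt (n : Int) (s : String) : Int :=
  let m : Int := PySem.Str.len s
  let k := min n m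
  let tl := PySem.List.slice s.toList none (some k)
  let r := (PySem.List.pyRange (k - 1) (-1) (-1)).foldl (pvBOuter tl k)
      (List.replicate (k + 1).toNat true, 0)
  r.2

-- ===== PRECONDITION & SPEC =====
-- Pre_ excludes n > len(s): outside the function's contract (the caller passes n = len(s)),
-- where A's out-of-range slice indices make it count clamped duplicate and empty slices.
def Pre_substrCount3 (n : Int) (s : String) : Prop := n ≤ PySem.Str.len s
instance (n : Int) (s : String) : Decidable (Pre_substrCount3 n s) := by unfold Pre_substrCount3; infer_instance
def pvWitness_substrCount3 : Int × String := (2, "ab")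
def Spec_substrCount3 (n : Int) (s : String) (out : Int) : Prop := out = substrCount3_alt n s
instance (n : Int) (s : String) (out : Int) : Decidable (Spec_substrCount3 n s out) := by unfold Spec_substrCount3; infer_instance

-- ===== CLAIM (what is proved, stated in full; the proofs are below) =====
def Claim_equal_substrCount3 : Prop := ∀ (n : Int) (s : String), Dom_substrCount3 n s → Pre_substrCount3 n s → Spec_substrCount3 n s (substrCount3 n s)

-- ===== LEMMAS AND PROOFS =====

-- substring s[x:y] as a list, Nat indices (the clamping matches Python's slice)
def pvSub (l : List Char) (x y : Nat) : List Char := (l.drop x).take (y - x)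
-- palindrome test A applies
def pvPal (l : List Char) (x y : Nat) : Bool := pvSub l x y == (pvSub l x y).reverse
-- the full test: palindrome with at most two distinct characters
def pvQ (l : List Char) (x y : Nat) : Bool :=
  pvPal l x y && decide ((PySem.Set.ofList (pvSub l x y)).length ≤ 2)
-- the Int-level test A's body applies to a pair (x, y)
def pvQA (s : String) (x y : Int) : Bool :=
  (PySem.Str.slice s (some x) (some y) ==
      (PySem.Str.slice? (PySem.Str.slice s (some x) (some y)) none none (-1)).getD "")
    && decide ((PySem.Dict.counter (PySem.Str.slice s (some x) (some y)).toList).size ≤ 2)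
-- number of qualifying pairs x < y drawn from an index list (Int / Nat levels)
def pvAList (s : String) : List Int → Int
  | [] => 0
  | x :: xs => (xs.countP (fun y => pvQA s x y) : Int) + pvAList s xs
def pvCnt (l : List Char) : List Nat → Nat
  | [] => 0
  | x :: xs => xs.countP (fun y => pvQ l x y) + pvCnt l xs

-- ---- generic facts ----

lemma pvSub_take {l : List Char} {K x y : Nat} (h : y ≤ K) :
    pvSub (l.take K) x y = pvSub l x y := by
  unfold pvSub
  rw [List.drop_take]
  rw [List.take_take]
  congr 1
  omega

-- ---- A-side reduction ----

lemma pvStr_beq (a b : String) : (a == b) = (a.toList == b.toList) := by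
  by_cases h : a.toList = b.toList
  · simp [String.toList_inj.mp h]
  · have hne : a ≠ b := fun hh => h (by rw [hh])
    simp [h, hne]

lemma pvA_foldl (s : String) (R : List Int) (acc : Int) :
    (PySem.List.combinations R 2).foldl (pvABody s) acc = acc + pvAList s R := by
  induction R generalizing acc with
  | nil => simp [pvAList, PySem.List.combinations]
  | cons x xs ih =>
    rw [PySem.List.combinations_cons_succ, List.foldl_append, ih]
    rw [PySem.List.combinations_one, List.map_map]
    simp only [Function.comp_def]
    rw [List.foldl_map]
    have hb : (fun (acc : Int) (y : Int) => pvABody s acc [x, y])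
        = fun acc y => if pvQA s x y = true then acc + 1 else acc := by
      funext acc y; simp [pvABody, pvQA]
    rw [hb, PySem.List.foldl_if_add_one]
    have h1 : pvAList s (x :: xs) = (List.countP (fun y => pvQA s x y) xs : Int) + pvAList s xs := rfl
    rw [h1]
    ring

lemma pvQA_cast (s : String) (x y : Nat) : pvQA s (x : Int) (y : Int) = pvQ s.toList x y := by
  unfold pvQA pvQ pvPal
  have hsub : (PySem.Str.slice s (some (x : Int)) (some (y : Int))).toList = pvSub s.toList x y := by
    simp [pvSub, PySem.List.slice_natCast]
  rw [PySem.Str.slice?_none_none_neg_one]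
  simp only [Option.getD_some]
  rw [pvStr_beq]
  simp only [String.toList_ofList, hsub]
  congr 1
  show decide ((PySem.Dict.counter (pvSub s.toList x y)).items.length ≤ 2) = _
  rw [PySem.Dict.items_counter, List.length_map]

lemma pvAList_map (s : String) (xs : List Nat) :
    pvAList s (xs.map (Nat.cast : Nat → Int)) = (pvCnt s.toList xs : Int) := by
  induction xs with
  | nil => rfl
  | cons x xs ih =>
    rw [List.map_cons]
    have h1 : pvAList s ((x : Int) :: xs.map (Nat.cast : Nat → Int)) =
        (List.countP (fun y => pvQA s (x : Int) y) (xs.map (Nat.cast : Nat → Int)) : Int) +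
          pvAList s (xs.map (Nat.cast : Nat → Int)) := rfl
    have h2 : pvCnt s.toList (x :: xs) =
        List.countP (fun y => pvQ s.toList x y) xs + pvCnt s.toList xs := rfl
    have hq : ((fun y => pvQA s (x : Int) y) ∘ (Nat.cast : Nat → Int)) =
        fun y => pvQ s.toList x y := by
      simp only [Function.comp_def]
      funext y
      exact pvQA_cast s x y
    rw [h1, List.countP_map, hq, ih, h2]
    push_cast
    ring

lemma substrCount3_eq_cnt (n : Int) (s : String) :
    substrCount3 n s = (pvCnt s.toList (List.range (n + 1).toNat) : Int) := by
  unfold substrCount3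
  rw [pvA_foldl, PySem.List.pyRange_one]
  have hc : (fun (k : Nat) => (0 : Int) + (k : Int)) = (Nat.cast : Nat → Int) := by
    funext k; simp
  simp only [Int.sub_zero, hc]
  rw [pvAList_map]
  ring

-- ---- B-side reduction ----

-- Nat-level inner step: pvBInner with all indices natural
def pvNStep (tl : List Char) (x : Nat) (nxt : List Bool)
    (st : List Bool × PySem.Set Char × Int) (y : Nat) :
    List Bool × PySem.Set Char × Int :=
  let c := tl.getD (y - 1) ' '
  let seen := PySem.Set.add st.2.1 c
  let p := (tl.getD x ' ' == c) && nxt.getD (y - 1) true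
  let cur := st.1 ++ [p]
  if p && decide ((seen : List Char).length ≤ 2) then
    (cur, seen, st.2.2 + 1)
  else
    (cur, seen, st.2.2)

lemma pvSet_len (t : PySem.Set Char) : PySem.Set.len t = ((t : List Char).length : Int) := rfl

lemma pvBInner_cast (tl : List Char) (x : Nat) (nxt : List Bool)
    (st : List Bool × PySem.Set Char × Int) (y : Nat) (hy : 1 ≤ y) :
    pvBInner tl (x : Int) nxt st (y : Int) = pvNStep tl x nxt st y := by
  simp only [pvBInner, pvNStep]
  rw [show (y : Int) - 1 = ((y - 1 : Nat) : Int) by omega]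
  rw [PySem.List.pyGetD_natCast, PySem.List.pyGetD_natCast, PySem.List.pyGetD_natCast]
  have h3 : ∀ t : PySem.Set Char,
      decide (PySem.Set.len t ≤ 2) = decide ((t : List Char).length ≤ 2) := by
    intro t
    rw [pvSet_len, decide_eq_decide]
    omega
  rw [h3]

lemma pvInner_fold_cast (tl : List Char) (K x : Nat) (nxt : List Bool)
    (st : List Bool × PySem.Set Char × Int) :
    (PySem.List.pyRange ((x : Int) + 1) ((K : Int) + 1) 1).foldl
        (pvBInner tl (x : Int) nxt) st =
      (List.range' (x + 1) (K - x)).foldl (pvNStep tl x nxt) st := by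
  rw [PySem.List.pyRange_one, List.foldl_map, List.range'_eq_map_range, List.foldl_map]
  rw [show (((K : Int) + 1) - ((x : Int) + 1)).toNat = K - x by omega]
  have hf : (fun (st : List Bool × PySem.Set Char × Int) (k : Nat) =>
        pvBInner tl (x : Int) nxt st ((x : Int) + 1 + (k : Int))) =
      fun st k => pvNStep tl x nxt st (x + 1 + k) := by
    funext st k
    rw [show ((x : Int) + 1 + (k : Int)) = ((x + 1 + k : Nat) : Int) by push_cast; ring]
    exact pvBInner_cast tl x nxt st (x + 1 + k) (by omega)
  rw [hf]

lemma pvPal_of_le {l : List Char} {x y : Nat} (h : y ≤ x) : pvPal l x y = true := by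
  have : y - x = 0 := Nat.sub_eq_zero_of_le h
  simp [pvPal, pvSub, this]

lemma pvPal_of_ge {l : List Char} {x y : Nat} (h : l.length ≤ x) : pvPal l x y = true := by
  simp [pvPal, pvSub, List.drop_eq_nil_of_le h]

lemma pvQ_take {l : List Char} {K x y : Nat} (h : y ≤ K) :
    pvQ (l.take K) x y = pvQ l x y := by
  unfold pvQ pvPal
  rw [pvSub_take h]

-- the characters of s[x:y] are those of s[x:y-1] plus s[y-1]
lemma pvSub_snoc {l : List Char} {x y : Nat} (hx : x < y) (hy : y ≤ l.length) :
    pvSub l x y = pvSub l x (y - 1) ++ [l.getD (y - 1) ' '] := by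
  have hj : y - 1 - x < (l.drop x).length := by simp; omega
  unfold pvSub
  rw [show y - x = (y - 1 - x) + 1 by omega, List.take_succ, List.getElem?_eq_getElem hj]
  have hg : (l.drop x)[y - 1 - x] = l.getD (y - 1) ' ' := by
    rw [List.getElem_drop, List.getD_eq_getElem l ' ' (by omega)]
    congr 1
    omega
  rw [hg]
  rfl

lemma pvSeen_step {l : List Char} {x y : Nat} (hx : x < y) (hy : y ≤ l.length) :
    PySem.Set.add (PySem.Set.ofList (pvSub l x (y - 1))) (l.getD (y - 1) ' ') =
      PySem.Set.ofList (pvSub l x y) := by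
  rw [pvSub_snoc hx hy, PySem.Set.ofList_eq_foldl, PySem.Set.ofList_eq_foldl,
    List.foldl_append]
  rfl

-- palindrome recurrence used by the DP
lemma pvPal_rec {l : List Char} {x y : Nat} (hxy : x < y) (hy : y ≤ l.length) :
    pvPal l x y = ((l.getD x ' ' == l.getD (y - 1) ' ') && pvPal l (x + 1) (y - 1)) := by
  have hx : x < l.length := lt_of_lt_of_le hxy hy
  rcases Nat.lt_or_ge (x + 1) y with h2 | h2
  · -- y ≥ x + 2 : strip the two end characters
    have hy1 : y - 1 < l.length := by omega
    have hsplit : pvSub l x y = l[x] :: (pvSub l (x + 1) (y - 1) ++ [l[y - 1]]) := by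
      unfold pvSub
      rw [List.drop_eq_getElem_cons hx, show y - x = (y - x - 1) + 1 by omega,
        List.take_succ_cons]
      congr 1
      have hj : y - 1 - (x + 1) < (l.drop (x + 1)).length := by
        rw [List.length_drop]
        omega
      rw [show y - x - 1 = (y - 1 - (x + 1)) + 1 by omega, List.take_succ,
        List.getElem?_eq_getElem hj]
      congr 2
      rw [List.getElem_drop]
      have hidx : x + 1 + (y - 1 - (x + 1)) = y - 1 := by omega
      simp only [hidx]
      rfl
    unfold pvPal
    rw [hsplit, List.getD_eq_getElem l ' ' hx, List.getD_eq_getElem l ' ' hy1]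
    have hrev : (l[x] :: (pvSub l (x + 1) (y - 1) ++ [l[y - 1]])).reverse =
        l[y - 1] :: ((pvSub l (x + 1) (y - 1)).reverse ++ [l[x]]) := by
      simp
    rw [hrev, Bool.eq_iff_iff]
    simp only [Bool.and_eq_true, beq_iff_eq, List.cons.injEq]
    constructor
    · rintro ⟨hab, htail⟩
      refine ⟨hab, ?_⟩
      rw [hab] at htail
      exact (List.append_left_inj [l[y - 1]]).mp htail
    · rintro ⟨hab, hw⟩
      exact ⟨hab, by rw [← hw, hab]⟩
  · -- y = x + 1 : a single character
    have hyx : y = x + 1 := by omega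
    subst hyx
    have h1 : pvSub l x (x + 1) = [l[x]] := by
      unfold pvSub
      rw [List.drop_eq_getElem_cons hx, Nat.add_sub_cancel_left]
      rfl
    have h2' : pvPal l (x + 1) (x + 1 - 1) = true := pvPal_of_le (by omega)
    rw [h2', Bool.and_true, Nat.add_sub_cancel, List.getD_eq_getElem l ' ' hx]
    unfold pvPal
    rw [h1]
    simp

-- the inner (y-)loop: row of palindrome flags and running count
lemma pvRow_spec (tl : List Char) (x : Nat) (hx : x < tl.length) :
    ∀ (len y0 : Nat), y0 + len ≤ tl.length + 1 → x < y0 →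
    ∀ (nxt cur : List Bool) (seen : PySem.Set Char) (count : Int),
      (∀ y, y ≤ tl.length → nxt.getD y true = pvPal tl (x + 1) y) →
      (∀ y, y < y0 → cur.getD y true = pvPal tl x y) →
      cur.length = y0 →
      seen = PySem.Set.ofList (pvSub tl x (y0 - 1)) →
      (List.range' y0 len).foldl (pvNStep tl x nxt) (cur, seen, count) =
        (cur ++ (List.range' y0 len).map (fun y => pvPal tl x y),
         PySem.Set.ofList (pvSub tl x (y0 - 1 + len)),
         count + ((List.range' y0 len).countP (fun y => pvQ tl x y) : Int)) := by
  intro len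
  induction len with
  | zero =>
    intro y0 hlen hxy nxt cur seen count hn hcur hclen hseen
    simp [hseen]
  | succ len ih =>
    intro y0 hlen hxy nxt cur seen count hn hcur hclen hseen
    have hy0K : y0 ≤ tl.length := by omega
    have hstep : pvNStep tl x nxt (cur, seen, count) y0 =
        (cur ++ [pvPal tl x y0], PySem.Set.ofList (pvSub tl x y0),
         count + (if pvQ tl x y0 = true then 1 else 0)) := by
      have hc : PySem.Set.add seen (tl.getD (y0 - 1) ' ') =
          PySem.Set.ofList (pvSub tl x y0) := by
        rw [hseen]; exact pvSeen_step hxy hy0K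
      have hp : ((tl.getD x ' ' == tl.getD (y0 - 1) ' ') && nxt.getD (y0 - 1) true) =
          pvPal tl x y0 := by
        rw [hn (y0 - 1) (by omega), ← pvPal_rec hxy hy0K]
      simp only [pvNStep]
      rw [hc, hp]
      have hq : (pvPal tl x y0 &&
          decide ((PySem.Set.ofList (pvSub tl x y0) : List Char).length ≤ 2)) =
          pvQ tl x y0 := rfl
      rw [hq]
      by_cases h : pvQ tl x y0 = true
      · simp [h]
      · simp [h]
    rw [List.range'_succ, List.foldl_cons, hstep]
    rw [ih (y0 + 1) (by omega) (by omega) nxt (cur ++ [pvPal tl x y0])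
      (PySem.Set.ofList (pvSub tl x y0))
      (count + (if pvQ tl x y0 = true then 1 else 0))
      hn
      (by
        intro y hy
        rcases Nat.lt_or_ge y y0 with h | h
        · rw [List.getD_append _ _ _ _ (by omega), hcur y h]
        · have hyy : y = y0 := by omega
          subst hyy
          rw [List.getD_append_right _ _ _ _ (by omega), hclen]
          simp
      )
      (by simp [hclen])
      (by simp)]
    have e1 : (cur ++ [pvPal tl x y0]) ++
        (List.range' (y0 + 1) len).map (fun y => pvPal tl x y) =
        cur ++ (List.range' y0 (len + 1)).map (fun y => pvPal tl x y) := by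
      rw [List.range'_succ, List.map_cons, List.append_assoc]
      rfl
    have e2 : y0 + 1 - 1 + len = y0 - 1 + (len + 1) := by omega
    have e3 : (count + (if pvQ tl x y0 = true then 1 else 0)) +
        ((List.range' (y0 + 1) len).countP (fun y => pvQ tl x y) : Int) =
        count + ((List.range' y0 (len + 1)).countP (fun y => pvQ tl x y) : Int) := by
      rw [List.range'_succ, List.countP_cons]
      by_cases h : pvQ tl x y0 = true
      · simp only [h, if_true]
        push_cast
        ring
      · simp [h]
    rw [e1, e2, e3]
    rw [List.range'_succ]

-- per-row count and helpers for the outer loop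
def pvRowCnt (l : List Char) (x : Nat) : Nat :=
  (List.range' (x + 1) (l.length - x)).countP (fun y => pvQ l x y)
def pvBelow (l : List Char) : Nat → Nat
  | 0 => 0
  | X + 1 => pvBelow l X + pvRowCnt l X
lemma pvOuter_spec (tl : List Char) :
    ∀ (X : Nat), X ≤ tl.length →
    ∀ (nxt : List Bool) (count : Int),
      (∀ y, y ≤ tl.length → nxt.getD y true = pvPal tl X y) →
      ∃ nxt', ((List.range X).reverse.map (Nat.cast : Nat → Int)).foldl
          (pvBOuter tl (tl.length : Int)) (nxt, count) =
        (nxt', count + (pvBelow tl X : Int)) := by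
  intro X
  induction X with
  | zero =>
    intro _ nxt count _
    exact ⟨nxt, by simp [pvBelow]⟩
  | succ X ih =>
    intro hX nxt count hn
    have hXK : X < tl.length := by omega
    rw [List.range_succ, List.reverse_append, List.reverse_singleton,
      List.singleton_append, List.map_cons, List.foldl_cons]
    have hstep : pvBOuter tl (tl.length : Int) (nxt, count) (X : Int) =
        (List.replicate (X + 1) true ++
            (List.range' (X + 1) (tl.length - X)).map (fun y => pvPal tl X y),
         count + ((List.range' (X + 1) (tl.length - X)).countP (fun y => pvQ tl X y) : Int)) := by
      simp only [pvBOuter]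
      rw [show ((X : Int) + 1).toNat = X + 1 by omega]
      rw [pvInner_fold_cast tl tl.length X nxt]
      rw [pvRow_spec tl X hXK (tl.length - X) (X + 1) (by omega) (by omega) nxt
        (List.replicate (X + 1) true) PySem.Set.empty count
        hn
        (by
          intro y hy
          rw [List.getD_eq_getElem _ _ (by simpa using hy), List.getElem_replicate]
          exact (pvPal_of_le (by omega)).symm
        )
        (by simp)
        (by
          rw [show X + 1 - 1 = X by omega]
          rw [show pvSub tl X X = [] by simp [pvSub]]
          rfl
        )]
    rw [hstep]
    obtain ⟨nxt', hrec⟩ := ih (by omega)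
      (List.replicate (X + 1) true ++
        (List.range' (X + 1) (tl.length - X)).map (fun y => pvPal tl X y))
      (count + ((List.range' (X + 1) (tl.length - X)).countP (fun y => pvQ tl X y) : Int))
      (by
        intro y hy
        rcases Nat.lt_or_ge y (X + 1) with h | h
        · rw [List.getD_append _ _ _ _ (by simpa using h), List.getD_eq_getElem _ _ (by simpa using h),
            List.getElem_replicate]
          exact (pvPal_of_le (by omega)).symm
        · have hlen1 : (List.replicate (X + 1) true).length = X + 1 := by simp
          rw [List.getD_append_right _ _ _ _ (by omega)]
          have hj : y - (X + 1) <
              ((List.range' (X + 1) (tl.length - X)).map (fun y => pvPal tl X y)).length := by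
            simp
            omega
          rw [hlen1, List.getD_eq_getElem _ _ hj]
          simp only [List.getElem_map, List.getElem_range']
          congr 1
          omega
      )
    refine ⟨nxt', ?_⟩
    rw [hrec]
    have hbelow : pvBelow tl (X + 1) = pvBelow tl X + pvRowCnt tl X := rfl
    rw [hbelow]
    unfold pvRowCnt
    simp only [Prod.mk.injEq]
    refine ⟨by trivial, by push_cast; ring⟩

lemma pvCnt_cons (l : List Char) (x : Nat) (xs : List Nat) :
    pvCnt l (x :: xs) = xs.countP (fun y => pvQ l x y) + pvCnt l xs := rfl

lemma pvBelow_aux (l : List Char) :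
    ∀ X, X ≤ l.length →
      pvCnt l (List.range' X (l.length + 1 - X)) + pvBelow l X =
        pvCnt l (List.range (l.length + 1)) := by
  intro X
  induction X with
  | zero =>
    intro _
    rw [show l.length + 1 - 0 = l.length + 1 from rfl, ← List.range_eq_range']
    simp [pvBelow]
  | succ X ih =>
    intro hX
    have h1 := ih (by omega)
    rw [show l.length + 1 - X = (l.length - X) + 1 by omega, List.range'_succ, pvCnt_cons] at h1
    rw [show l.length + 1 - (X + 1) = l.length - X by omega]
    have hb : pvBelow l (X + 1) = pvBelow l X + pvRowCnt l X := rfl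
    rw [hb]
    unfold pvRowCnt at *
    omega

lemma pvBelow_eq_cnt (l : List Char) :
    pvBelow l l.length = pvCnt l (List.range (l.length + 1)) := by
  have h := pvBelow_aux l l.length (le_refl _)
  rw [show l.length + 1 - l.length = 1 by omega, List.range'_one] at h
  have h0 : pvCnt l [l.length] = 0 := by simp [pvCnt]
  rw [h0] at h
  omega

lemma pvCnt_congr (l1 l2 : List Char) (xs : List Nat)
    (h : ∀ x ∈ xs, ∀ y ∈ xs, pvQ l1 x y = pvQ l2 x y) : pvCnt l1 xs = pvCnt l2 xs := by
  induction xs with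
  | nil => rfl
  | cons x xs ih =>
    rw [pvCnt_cons, pvCnt_cons,
      ih (fun a ha b hb => h a (List.mem_cons_of_mem _ ha) b (List.mem_cons_of_mem _ hb))]
    have hc : List.countP (fun y => pvQ l1 x y) xs = List.countP (fun y => pvQ l2 x y) xs := by
      refine List.countP_congr ?_
      intro y hy
      rw [h x List.mem_cons_self y (List.mem_cons_of_mem _ hy)]
    rw [hc]

lemma pvCnt_take (l : List Char) (K : Nat) (hK : K ≤ l.length) :
    pvCnt (l.take K) (List.range (K + 1)) = pvCnt l (List.range (K + 1)) := by
  refine pvCnt_congr _ _ _ ?_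
  intro x _ y hy
  exact pvQ_take (by
    have := List.mem_range.mp hy
    omega)

-- B's port computes the count over the prefix of length min(n, len s)
lemma substrCount3_alt_eq_cnt (n : Int) (s : String) :
    substrCount3_alt n s = (pvCnt s.toList (List.range ((min n (s.toList.length : Int)) + 1).toNat) : Int) := by
  unfold substrCount3_alt
  simp only [PySem.Str.len_eq]
  set L : List Char := s.toList with hL
  set m : Nat := L.length with hm
  set k : Int := min n (m : Int) with hk
  by_cases hk1 : k < 1
  · -- the x-loop is empty
    rw [PySem.List.pyRange_neg_one_eq_nil (by omega), List.foldl_nil]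
    have h2 : (k + 1).toNat = 0 ∨ (k + 1).toNat = 1 := by omega
    rcases h2 with h | h <;> rw [h]
    · simp [pvCnt]
    · rw [List.range_one]
      simp [pvCnt]
  · have hkpos : 1 ≤ k := by omega
    set K : Nat := k.toNat with hK
    have hKm : K ≤ m := by omega
    have htl : PySem.List.slice L none (some k) = L.take K := by
      rw [PySem.List.slice_to L (by omega)]
    rw [htl]
    have htlen : (L.take K).length = K := by
      simp [hm] at hKm ⊢
      omega
    have hrange : PySem.List.pyRange (k - 1) (-1) (-1) =
        (List.range K).reverse.map (Nat.cast : Nat → Int) := by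
      rw [PySem.List.pyRange_neg_one_eq_reverse]
      rw [show (-1 : Int) + 1 = 0 by ring, show k - 1 + 1 = k by ring]
      rw [PySem.List.pyRange_one]
      have hc : (fun (j : Nat) => (0 : Int) + (j : Int)) = (Nat.cast : Nat → Int) := by
        funext j; simp
      rw [Int.sub_zero, hc, List.map_reverse]
    rw [hrange]
    have hrep : ((k + 1).toNat) = K + 1 := by omega
    rw [hrep]
    have hkK : k = ((L.take K).length : Int) := by rw [htlen]; omega
    rw [hkK]
    obtain ⟨nxt', hfold⟩ := pvOuter_spec (L.take K) (L.take K).length (le_refl _)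
      (List.replicate ((L.take K).length + 1) true) 0
      (by
        intro y hy
        have hlt : y < (List.replicate ((L.take K).length + 1) true).length := by
          simp only [List.length_replicate]
          omega
        rw [List.getD_eq_getElem _ _ hlt, List.getElem_replicate]
        exact (pvPal_of_ge (le_refl _)).symm
      )
    rw [show ((L.take K).length + 1) = K + 1 by rw [htlen]] at hfold
    rw [show (List.range K) = List.range (L.take K).length by rw [htlen]]
    rw [hfold]
    have hbelow : pvBelow (L.take K) (L.take K).length =
        pvCnt (L.take K) (List.range ((L.take K).length + 1)) := pvBelow_eq_cnt _
    rw [hbelow, htlen, pvCnt_take L K hKm]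
    push_cast
    ring

-- ===== VERDICT (by name: the statement is the Claim_ definition above) =====
theorem substrCount3_spec : Claim_equal_substrCount3 := by
  intro n s _ hPre
  show substrCount3 n s = substrCount3_alt n s
  have hle : n ≤ (s.toList.length : Int) := by
    simpa [Pre_substrCount3, PySem.Str.len_eq] using hPre
  rw [substrCount3_eq_cnt, substrCount3_alt_eq_cnt, min_eq_left hle]
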